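-- pv_equiv track=rewrite | github.com/stvadu/Python-tests | secretar.py | get_directory
-- ===== SOURCE A (Python) =====
-- directories = {
--     '1': ['2207 876234', '11-2', '5455 028765'],
--     '2': ['10006'],
--     '3': []
-- }
--
-- def get_directory(doc_number):
--     n_in = False
--     for numbers2 in directories:
--         if doc_number in directories.get(numbers2):
--             shelf_n = numbers2
--             n_in = True
--     if n_in:
--         return shelf_n
--     else:
--         return "Полки с таким документом не найдено"
-- ===== SOURCE B (Python) =====
-- directories = {
--     '1': ['2207 876234', '11-2', '5455 028765'],
--     '2': ['10006'],
--     '3': []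
-- }
--
-- def get_directory(doc_number):
--     pairs = [(shelf, num) for shelf, nums in directories.items() for num in nums]
--     for shelf, num in reversed(pairs):
--         if num == doc_number:
--             return shelf
--     return "Полки с таким документом не найдено"
-- ===== Notes on version B (the rewrite author's own statement) =====
-- stated objective: alternative
-- what changed: Replaced A's full scan of every shelf with a running flag (last match wins) by flattening the dict into a (shelf, number) pair list once and scanning it back-to-front with an early return on the first match, which is exactly A's last match.
import Mathlib
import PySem

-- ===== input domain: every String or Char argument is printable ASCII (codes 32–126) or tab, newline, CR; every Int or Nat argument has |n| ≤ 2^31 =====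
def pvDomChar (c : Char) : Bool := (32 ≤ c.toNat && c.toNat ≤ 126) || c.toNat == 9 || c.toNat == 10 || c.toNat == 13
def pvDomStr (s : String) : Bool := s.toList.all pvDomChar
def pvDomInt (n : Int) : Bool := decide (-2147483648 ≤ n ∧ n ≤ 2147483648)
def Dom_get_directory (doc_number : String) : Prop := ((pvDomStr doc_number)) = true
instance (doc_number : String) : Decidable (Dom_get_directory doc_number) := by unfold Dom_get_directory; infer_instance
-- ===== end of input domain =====

-- B flattens the dict into a (shelf, number) pair list and scans it back-to-front with an early return (alternative decomposition, same cost).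

-- the module-level 'directories' dict, shared data of both ports
def pyDirectories : PySem.Dict String (List String) :=
  PySem.Dict.ofList [("1", ["2207 876234", "11-2", "5455 028765"]), ("2", ["10006"]), ("3", [])]

-- ===== PORT A =====
-- loop state is (n_in, shelf_n); the unset shelf_n is modelled as "" (never returned: st.1 = true whenever it is read)
def get_directory (doc_number : String) : String :=
  let st := pyDirectories.keys.foldl
    (fun (acc : Bool × String) numbers2 =>
      if (pyDirectories.getD numbers2 []).contains doc_number then (true, numbers2) else acc)
    (false, "")
  if st.1 then st.2 else "Полки с таким документом не найдено"

-- ===== PORT B =====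
-- the early-return for-loop over the reversed pair list, as structural recursion
def pvScanRev (doc : String) : List (String × String) → String
  | [] => "Полки с таким документом не найдено"
  | (shelf, num) :: rest => if num == doc then shelf else pvScanRev doc rest

def get_directory_alt (doc_number : String) : String :=
  let pairs := pyDirectories.items.foldl
    (fun (acc : List (String × String)) kv => acc ++ kv.2.map (fun n => (kv.1, n))) []
  pvScanRev doc_number pairs.reverse

-- ===== PRECONDITION & SPEC =====
def Spec_get_directory (doc_number : String) (out : String) : Prop := out = get_directory_alt doc_number
instance (doc_number : String) (out : String) : Decidable (Spec_get_directory doc_number out) := by unfold Spec_get_directory; infer_instance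

-- ===== CLAIM (what is proved, stated in full; the proofs are below) =====
def Claim_equal_get_directory : Prop := ∀ (doc_number : String), Dom_get_directory doc_number → Spec_get_directory doc_number (get_directory doc_number)

-- ===== LEMMAS AND PROOFS =====
-- B's pair list does not depend on doc_number; the reversed flattened list is this literal
theorem get_directory_altEq (doc_number : String) : get_directory_alt doc_number =
    pvScanRev doc_number
      [("2","10006"),("1","5455 028765"),("1","11-2"),("1","2207 876234")] := rfl

theorem pyDirectories_keys : pyDirectories.keys = ["1","2","3"] := rfl
theorem pyDirectories_g1 : pyDirectories.getD "1" [] = ["2207 876234", "11-2", "5455 028765"] := rfl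
theorem pyDirectories_g2 : pyDirectories.getD "2" [] = ["10006"] := rfl
theorem pyDirectories_g3 : pyDirectories.getD "3" [] = [] := rfl

theorem get_directory_eq (doc_number : String) :
    get_directory doc_number = get_directory_alt doc_number := by
  by_cases h1 : doc_number = "2207 876234"
  · subst h1; decide
  by_cases h2 : doc_number = "11-2"
  · subst h2; decide
  by_cases h3 : doc_number = "5455 028765"
  · subst h3; decide
  by_cases h4 : doc_number = "10006"
  · subst h4; decide
  rw [get_directory_altEq]
  simp only [get_directory, pyDirectories_keys, List.foldl,
    pyDirectories_g1, pyDirectories_g2, pyDirectories_g3]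
  have e1 : ("2207 876234" == doc_number) = false := by simp [Ne.symm h1]
  have e2 : ("11-2" == doc_number) = false := by simp [Ne.symm h2]
  have e3 : ("5455 028765" == doc_number) = false := by simp [Ne.symm h3]
  have e4 : ("10006" == doc_number) = false := by simp [Ne.symm h4]
  simp [pvScanRev, h1, h2, h3, h4, e1, e2, e3, e4]

-- ===== VERDICT (by name: the statement is the Claim_ definition above) =====
theorem get_directory_spec : Claim_equal_get_directory := by
  intro doc_number _
  exact get_directory_eq doc_number
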